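-- pv_equiv track=rewrite | github.com/ibloise/FIS_opentrons_protocols | opentrons_protocols/extraction_sybr_dispensing.py | calc_wells_for_quadrant
-- ===== SOURCE A (Python) =====
-- def tuple_quadrants(quadrants):
--     '''
--     Recibe un diccionario de cuadrantes y devuelve un diccionario con listas de tuplas de celdas identificadas individualmente por cuadrante
--     '''
--     tuple_quadrant = {}
--     for key, value in quadrants.items():
--         tuples_list = [(row, col) for row in value[0] for col in value[1]]
--         tuple_quadrant[key] = tuples_list
--     return tuple_quadrant
--
-- def calc_wells_for_quadrant(tuple_quadrants, well_coords):
--     '''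
--     traduce las coordenads que controla tuple_quadrants a posiciones de celda
--     '''
--     wells_quadrants = {}
--     for key, value in tuple_quadrants.items():
--         well_list = []
--         for well, coords in well_coords.items():
--             if coords in value:
--                 well_list.append(well)
--         well_list.sort()
--         wells_quadrants[key] = well_list
--     return wells_quadrants
-- ===== SOURCE B (Python) =====
-- def calc_wells_for_quadrant(tuple_quadrants, well_coords):
--     '''
--     traduce las coordenads que controla tuple_quadrants a posiciones de celda
--     '''
--     index = {}
--     for well, coords in well_coords.items():
--         index.setdefault(coords, []).append(well)
--     return dict((key, sorted(w for coords in dict.fromkeys(value) for w in index.get(coords, [])))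
--                 for key, value in tuple_quadrants.items())
-- ===== Notes on version B (the rewrite author's own statement) =====
-- stated objective: faster
-- what changed: B builds an inverted index coords->wells in one pass and then assembles each quadrant's dict entry directly from its deduplicated coordinates via a dict() constructor over a generator, instead of A's per-quadrant rescan of all wells with a linear membership test in the quadrant's coordinate list.
import Mathlib
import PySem

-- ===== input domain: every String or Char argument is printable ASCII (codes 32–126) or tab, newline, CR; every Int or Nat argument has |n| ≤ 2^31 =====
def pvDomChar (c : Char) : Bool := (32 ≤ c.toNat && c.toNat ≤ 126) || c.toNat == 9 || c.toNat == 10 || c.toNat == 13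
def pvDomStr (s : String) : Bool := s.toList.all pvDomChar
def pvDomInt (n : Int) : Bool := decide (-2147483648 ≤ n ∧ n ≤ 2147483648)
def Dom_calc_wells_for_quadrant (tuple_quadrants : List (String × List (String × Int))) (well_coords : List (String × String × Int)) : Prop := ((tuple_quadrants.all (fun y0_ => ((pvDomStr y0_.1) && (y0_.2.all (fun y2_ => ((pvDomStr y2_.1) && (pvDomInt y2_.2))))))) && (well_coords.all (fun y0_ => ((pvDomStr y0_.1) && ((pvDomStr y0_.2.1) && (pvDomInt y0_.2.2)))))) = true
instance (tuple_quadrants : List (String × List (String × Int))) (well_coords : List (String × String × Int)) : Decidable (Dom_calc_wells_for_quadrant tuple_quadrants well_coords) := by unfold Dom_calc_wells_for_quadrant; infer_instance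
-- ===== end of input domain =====

-- B builds an inverted index coords->wells once and assembles each quadrant's entry directly from
-- its deduplicated coordinates via a dict() constructor, instead of A's per-quadrant scan of all
-- wells with a linear membership test (faster).

-- ===== PORT A =====
def calc_wells_for_quadrant (tuple_quadrants : List (String × List (String × Int))) (well_coords : List (String × String × Int)) : List (String × List String) :=
  (tuple_quadrants.foldl
    (fun (wells_quadrants : PySem.Dict String (List String)) kv =>
      let well_list := well_coords.foldl
        (fun (acc : List String) w => if kv.2.contains w.2 then acc ++ [w.1] else acc) []
      wells_quadrants.insert kv.1 (PySem.List.sorted well_list (fun x => x) false))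
    PySem.Dict.empty).items

-- ===== PORT B =====
def calc_wells_for_quadrant_alt (tuple_quadrants : List (String × List (String × Int))) (well_coords : List (String × String × Int)) : List (String × List String) :=
  let index : PySem.Dict (String × Int) (List String) :=
    well_coords.foldl (fun d w => d.modify w.2 [] (fun l => l ++ [w.1])) PySem.Dict.empty
  (PySem.Dict.ofList (tuple_quadrants.map (fun kv =>
      (kv.1, PySem.List.sorted ((PySem.List.dedup kv.2).flatMap (fun c => index.getD c []))
               (fun x => x) false)))).items

-- ===== PRECONDITION & SPEC =====
def Spec_calc_wells_for_quadrant (tuple_quadrants : List (String × List (String × Int))) (well_coords : List (String × String × Int)) (out : List (String × List String)) : Prop := out = calc_wells_for_quadrant_alt tuple_quadrants well_coords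
instance (tuple_quadrants : List (String × List (String × Int))) (well_coords : List (String × String × Int)) (out : List (String × List String)) : Decidable (Spec_calc_wells_for_quadrant tuple_quadrants well_coords out) := by unfold Spec_calc_wells_for_quadrant; infer_instance

-- ===== CLAIM =====
def Claim_equal_calc_wells_for_quadrant : Prop := ∀ (tuple_quadrants : List (String × List (String × Int))) (well_coords : List (String × String × Int)), Dom_calc_wells_for_quadrant tuple_quadrants well_coords → Spec_calc_wells_for_quadrant tuple_quadrants well_coords (calc_wells_for_quadrant tuple_quadrants well_coords)

-- ===== LEMMAS AND PROOFS =====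

-- filtering by a disjunction of disjoint tests splits, up to permutation
lemma pv_filter_or_perm {α : Type} (p q : α → Bool) (h : ∀ x, p x = true → q x = false)
    (ws : List α) :
    (ws.filter (fun x => p x || q x)).Perm (ws.filter p ++ ws.filter q) := by
  induction ws with
  | nil => simp
  | cons a t ih =>
    by_cases hp : p a = true
    · simp [hp, h a hp]
      exact ih
    · by_cases hq : q a = true
      · simp [Bool.eq_false_iff.mpr hp, hq]
        exact (ih.cons a).trans List.perm_middle.symm
      · simp [Bool.eq_false_iff.mpr hp, Bool.eq_false_iff.mpr hq]
        exact ih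

-- filtering on membership in a Nodup list splits into per-element filters, up to permutation
lemma pv_filter_mem_perm (d : List (String × Int)) (hd : d.Nodup)
    (ws : List (String × String × Int)) :
    (ws.filter (fun w => d.contains w.2)).Perm
      (d.flatMap (fun c => ws.filter (fun w => w.2 == c))) := by
  induction d with
  | nil => simp
  | cons c d' ih =>
    rcases List.nodup_cons.mp hd with ⟨hc, hd'⟩
    have hsplit : (ws.filter (fun w => (c :: d').contains w.2)).Perm
        (ws.filter (fun w => w.2 == c) ++ ws.filter (fun w => d'.contains w.2)) := by
      have : (fun w : String × String × Int => (c :: d').contains w.2)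
           = (fun w : String × String × Int => (w.2 == c) || d'.contains w.2) := by
        funext w; rw [List.contains_cons]
      rw [this]
      exact pv_filter_or_perm _ _
        (fun w hw => by
          have : w.2 = c := by simpa using hw
          subst this
          simpa using hc) ws
    simpa [List.flatMap_cons] using hsplit.trans ((ih hd').append_left _)

-- the inverted index looks up exactly the wells whose coords equal c, in well_coords order
lemma pv_index_getD (well_coords : List (String × String × Int)) (c : String × Int) :
    (well_coords.foldl (fun d w => d.modify w.2 [] (fun l => l ++ [w.1]))
        (PySem.Dict.empty : PySem.Dict (String × Int) (List String))).getD c []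
      = (well_coords.filter (fun w => w.2 == c)).map (·.1) := by
  have hmap : well_coords.foldl (fun d w => d.modify w.2 [] (fun l => l ++ [w.1]))
        (PySem.Dict.empty : PySem.Dict (String × Int) (List String))
      = (well_coords.map (fun w => (w.2, w.1))).foldl
          (fun d p => d.modify p.1 [] (fun l => l ++ [p.2])) PySem.Dict.empty := by
    rw [List.foldl_map]
  rw [hmap, PySem.Dict.getD_foldl_modify_append]
  simp [List.filter_map, Function.comp_def]

-- per quadrant: A's sorted scan equals the sorted index-gather
lemma pv_quadrant_eq (well_coords : List (String × String × Int))
    (v : List (String × Int)) :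
    PySem.List.sorted (well_coords.foldl
        (fun (acc : List String) w => if v.contains w.2 then acc ++ [w.1] else acc) [])
        (fun x => x) false
      = PySem.List.sorted ((PySem.List.dedup v).flatMap
          (fun c => (well_coords.foldl (fun d w => d.modify w.2 [] (fun l => l ++ [w.1]))
            (PySem.Dict.empty : PySem.Dict (String × Int) (List String))).getD c []))
          (fun x => x) false := by
  have hA : well_coords.foldl
      (fun (acc : List String) w => if v.contains w.2 then acc ++ [w.1] else acc) []
      = (well_coords.filter (fun w => v.contains w.2)).map (·.1) := by
    simpa using PySem.List.foldl_append_if (fun w : String × String × Int => v.contains w.2)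
      (fun w => w.1) well_coords []
  have hB : (PySem.List.dedup v).flatMap
      (fun c => (well_coords.foldl (fun d w => d.modify w.2 [] (fun l => l ++ [w.1]))
        (PySem.Dict.empty : PySem.Dict (String × Int) (List String))).getD c [])
      = (PySem.List.dedup v).flatMap
          (fun c => (well_coords.filter (fun w => w.2 == c)).map (·.1)) :=
    List.flatMap_congr (fun c _ => pv_index_getD well_coords c)
  rw [hA, hB]
  apply PySem.List.sorted_eq_sorted_of_perm _ _ _ (fun a b h => h)
  have hfc : well_coords.filter (fun w => v.contains w.2)
      = well_coords.filter (fun w => (PySem.List.dedup v).contains w.2) := by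
    apply List.filter_congr
    intro w _
    simp
  rw [hfc, ← List.map_flatMap]
  exact (pv_filter_mem_perm (PySem.List.dedup v) (PySem.List.nodup_dedup v)
    well_coords).map (·.1)

-- dict((k, f(kv)) for kv in l) is the successive-insert fold
lemma pv_ofList_eq_foldl {ν : Type} (tq : List (String × List (String × Int)))
    (f : String × List (String × Int) → ν) (d : PySem.Dict String ν) :
    ((tq.map (fun kv => (kv.1, f kv))).foldl (fun wq p => wq.insert p.1 p.2) d)
      = tq.foldl (fun wq kv => wq.insert kv.1 (f kv)) d := by
  rw [List.foldl_map]

-- ===== VERDICT =====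
theorem calc_wells_for_quadrant_spec : Claim_equal_calc_wells_for_quadrant := by
  intro tq wc _
  unfold Spec_calc_wells_for_quadrant calc_wells_for_quadrant calc_wells_for_quadrant_alt
  congr 1
  have hofList : ∀ (l : List (String × List String)),
      PySem.Dict.ofList l = l.foldl (fun wq p => wq.insert p.1 p.2) PySem.Dict.empty := by
    intro l; rfl
  rw [hofList, pv_ofList_eq_foldl]
  induction tq with
  | nil => rfl
  | cons kv t ih =>
    simp only [List.foldl_cons]
    rw [pv_quadrant_eq]
    -- remaining folds agree from equal accumulators
    have : ∀ (l : List (String × List (String × Int))) (d : PySem.Dict String (List String)),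
        l.foldl (fun wq kv => wq.insert kv.1 (PySem.List.sorted (wc.foldl
          (fun (acc : List String) w => if kv.2.contains w.2 then acc ++ [w.1] else acc) [])
          (fun x => x) false)) d
        = l.foldl (fun wq kv => wq.insert kv.1
            (PySem.List.sorted ((PySem.List.dedup kv.2).flatMap
              (fun c => (wc.foldl (fun d w => d.modify w.2 [] (fun l => l ++ [w.1]))
                (PySem.Dict.empty : PySem.Dict (String × Int) (List String))).getD c []))
              (fun x => x) false)) d := by
      intro l
      induction l with
      | nil => intro d; rfl
      | cons kv' t' ih' =>
        intro d
        simp only [List.foldl_cons]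
        rw [pv_quadrant_eq]
        exact ih' _
    exact this _ _
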